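-- pv_equiv track=rewrite | github.com/jrstubbies/AoC_2024 | Day_2_Part_B.py | numsAreUnique
-- ===== SOURCE A (Python) =====
-- def numsAreUnique(lst):
--     count = 0
--     seen = set()
--     temp_list = []
--
--     for i in lst:
--         #if more than one duplicate then too many errors, early exit and ignore input line
--         if i in seen and count > 1:
--             return None
--
--         # allow for ONE duplicate to occur
--         if i in seen and count <= 1:
--             count += 1
--
--         if i not in seen:
--             seen.add(i)
--             temp_list.append(i)
--
--     # if reach here then there is at MOST ONE ERROR, which is OK
--     return temp_list
-- ===== SOURCE B (Python) =====
-- def numsAreUnique(lst):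
--     extras = len(lst) - len(set(lst))
--     if extras > 2:
--         return None
--     return list(dict.fromkeys(lst))
-- ===== Notes on version B (the rewrite author's own statement) =====
-- stated objective: simpler
-- what changed: Replaces the stateful per-element pass (running duplicate count, early exit, manual seen-set/list maintenance) with an aggregate count extras = len(lst) - len(set(lst)) followed by a separate order-preserving dedup via dict.fromkeys.
import Mathlib
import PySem

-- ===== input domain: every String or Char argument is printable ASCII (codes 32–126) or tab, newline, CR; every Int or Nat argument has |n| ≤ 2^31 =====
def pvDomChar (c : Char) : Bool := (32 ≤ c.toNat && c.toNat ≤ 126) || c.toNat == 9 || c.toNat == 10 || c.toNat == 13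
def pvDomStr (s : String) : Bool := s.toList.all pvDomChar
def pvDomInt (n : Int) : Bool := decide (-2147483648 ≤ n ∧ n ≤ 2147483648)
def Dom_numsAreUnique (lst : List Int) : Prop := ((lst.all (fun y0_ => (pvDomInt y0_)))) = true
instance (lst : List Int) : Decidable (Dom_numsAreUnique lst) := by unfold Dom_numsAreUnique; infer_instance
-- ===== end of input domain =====

-- B replaces A's stateful pass (running duplicate count + early exit) with an aggregate
-- duplicate count followed by a separate order-preserving dedup; objective: simpler.

-- ===== PORT A =====
-- the for-loop of A, carrying count / seen / temp_list as state (early 'return None' = none)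
def numsAreUniqueLoop : List Int → Int → PySem.Set Int → List Int → Option (List Int)
  | [], _, _, temp => some temp
  | i :: rest, count, seen, temp =>
    if PySem.Set.contains seen i ∧ count > 1 then none
    else
      let count' := if PySem.Set.contains seen i ∧ count ≤ 1 then count + 1 else count
      let seen' := if ¬ PySem.Set.contains seen i then PySem.Set.add seen i else seen
      let temp' := if ¬ PySem.Set.contains seen i then temp ++ [i] else temp
      numsAreUniqueLoop rest count' seen' temp'

def numsAreUnique (lst : List Int) : Option (List Int) :=
  numsAreUniqueLoop lst 0 PySem.Set.empty []

-- ===== PORT B =====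
def numsAreUnique_alt (lst : List Int) : Option (List Int) :=
  let extras : Int := (lst.length : Int) - ((PySem.Set.ofList lst).length : Int)
  if extras > 2 then none else some (PySem.List.dedup lst)

-- ===== PRECONDITION & SPEC =====
def Spec_numsAreUnique (lst : List Int) (out : Option (List Int)) : Prop := out = numsAreUnique_alt lst
instance (lst : List Int) (out : Option (List Int)) : Decidable (Spec_numsAreUnique lst out) := by unfold Spec_numsAreUnique; infer_instance

-- ===== CLAIM (what is proved, stated in full; the proofs are below) =====
def Claim_equal_numsAreUnique : Prop := ∀ (lst : List Int), Dom_numsAreUnique lst → Spec_numsAreUnique lst (numsAreUnique lst)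

-- ===== LEMMAS AND PROOFS =====

-- number of duplicate occurrences of lst relative to an already-seen set
def dupCnt : PySem.Set Int → List Int → Int
  | _, [] => 0
  | seen, x :: xs => (if PySem.Set.contains seen x then 1 else 0) + dupCnt (PySem.Set.add seen x) xs

-- the fresh elements of lst relative to an already-seen set, in order
def newOf : PySem.Set Int → List Int → List Int
  | _, [] => []
  | seen, x :: xs => (if PySem.Set.contains seen x then [] else [x]) ++ newOf (PySem.Set.add seen x) xs

lemma add_of_mem (seen : PySem.Set Int) (x : Int)
    (h : x ∈ seen) : PySem.Set.add seen x = seen := by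
  simp [PySem.Set.add, h]

lemma add_of_not_mem (seen : PySem.Set Int) (x : Int)
    (h : ¬ x ∈ seen) : PySem.Set.add seen x = seen ++ [x] := by
  simp [PySem.Set.add, h]

lemma dupCnt_cons_mem (seen : PySem.Set Int) (x : Int) (xs : List Int) (h : x ∈ seen) :
    dupCnt seen (x :: xs) = 1 + dupCnt seen xs := by
  simp [dupCnt, h]

lemma dupCnt_cons_not_mem (seen : PySem.Set Int) (x : Int) (xs : List Int) (h : ¬ x ∈ seen) :
    dupCnt seen (x :: xs) = dupCnt (seen ++ [x]) xs := by
  simp [dupCnt, h]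

lemma newOf_cons_mem (seen : PySem.Set Int) (x : Int) (xs : List Int) (h : x ∈ seen) :
    newOf seen (x :: xs) = newOf seen xs := by
  simp [newOf, h]

lemma newOf_cons_not_mem (seen : PySem.Set Int) (x : Int) (xs : List Int) (h : ¬ x ∈ seen) :
    newOf seen (x :: xs) = x :: newOf (seen ++ [x]) xs := by
  simp [newOf, h]

lemma dupCnt_nonneg (lst : List Int) : ∀ (seen : PySem.Set Int), 0 ≤ dupCnt seen lst := by
  induction lst with
  | nil => intro seen; simp [dupCnt]
  | cons x xs ih =>
    intro seen
    have := ih (PySem.Set.add seen x)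
    simp only [dupCnt]
    split <;> omega

lemma update_eq_append_newOf (lst : List Int) : ∀ (seen : PySem.Set Int),
    PySem.Set.update seen lst = seen ++ newOf seen lst := by
  induction lst with
  | nil => intro seen; simp [PySem.Set.update, newOf]
  | cons x xs ih =>
    intro seen
    by_cases h : x ∈ seen
    · rw [newOf_cons_mem seen x xs h]
      show PySem.Set.update (PySem.Set.add seen x) xs = _
      rw [add_of_mem seen x h, ih seen]
    · rw [newOf_cons_not_mem seen x xs h]
      show PySem.Set.update (PySem.Set.add seen x) xs = _
      rw [add_of_not_mem seen x h, ih (seen ++ [x])]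
      simp

lemma dupCnt_len (lst : List Int) : ∀ (seen : PySem.Set Int),
    dupCnt seen lst = (lst.length : Int) + (seen.length : Int) - ((PySem.Set.update seen lst).length : Int) := by
  induction lst with
  | nil => intro seen; simp [dupCnt, PySem.Set.update]
  | cons x xs ih =>
    intro seen
    by_cases h : x ∈ seen
    · rw [dupCnt_cons_mem seen x xs h]
      have hu : PySem.Set.update seen (x :: xs) = PySem.Set.update seen xs := by
        show PySem.Set.update (PySem.Set.add seen x) xs = _
        rw [add_of_mem seen x h]
      rw [hu, ih seen]
      simp; push_cast; ring
    · rw [dupCnt_cons_not_mem seen x xs h]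
      have hu : PySem.Set.update seen (x :: xs) = PySem.Set.update (seen ++ [x]) xs := by
        show PySem.Set.update (PySem.Set.add seen x) xs = _
        rw [add_of_not_mem seen x h]
      rw [hu, ih (seen ++ [x])]
      simp; push_cast; ring

lemma loop_spec (lst : List Int) : ∀ (count : Int) (seen : PySem.Set Int) (temp : List Int),
    count ≤ 2 →
    numsAreUniqueLoop lst count seen temp =
      if count + dupCnt seen lst > 2 then none else some (temp ++ newOf seen lst) := by
  induction lst with
  | nil => intro count seen temp hc; simp [numsAreUniqueLoop, dupCnt, newOf]; omega
  | cons x xs ih =>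
    intro count seen temp hc
    by_cases h : x ∈ seen
    · by_cases h2 : count > 1
      · have hloop : numsAreUniqueLoop (x :: xs) count seen temp = none := by
          simp [numsAreUniqueLoop, h, h2]
        have hd := dupCnt_nonneg xs seen
        rw [hloop, dupCnt_cons_mem seen x xs h, if_pos (by omega)]
      · have hle : count ≤ 1 := by omega
        have hloop : numsAreUniqueLoop (x :: xs) count seen temp
            = numsAreUniqueLoop xs (count + 1) seen temp := by
          simp [numsAreUniqueLoop, h, h2, hle]
        rw [hloop, ih (count + 1) seen temp (by omega),
          dupCnt_cons_mem seen x xs h, newOf_cons_mem seen x xs h]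
        have : count + 1 + dupCnt seen xs = count + (1 + dupCnt seen xs) := by ring
        rw [this]
    · have hloop : numsAreUniqueLoop (x :: xs) count seen temp
          = numsAreUniqueLoop xs count (seen ++ [x]) (temp ++ [x]) := by
        simp [numsAreUniqueLoop, h]
      rw [hloop, ih count (seen ++ [x]) (temp ++ [x]) hc,
        dupCnt_cons_not_mem seen x xs h, newOf_cons_not_mem seen x xs h]
      simp

-- ===== VERDICT (by name: the statement is the Claim_ definition above) =====
theorem numsAreUnique_spec : Claim_equal_numsAreUnique := by
  intro lst _
  unfold Spec_numsAreUnique numsAreUnique numsAreUnique_alt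
  rw [loop_spec lst 0 PySem.Set.empty [] (by norm_num)]
  have h1 : dupCnt PySem.Set.empty lst
      = (lst.length : Int) - ((PySem.Set.ofList lst).length : Int) := by
    rw [dupCnt_len lst PySem.Set.empty]
    simp [PySem.Set.empty, PySem.Set.update, PySem.Set.ofList_eq_foldl]
  have h2 : newOf PySem.Set.empty lst = PySem.List.dedup lst := by
    have := update_eq_append_newOf lst PySem.Set.empty
    simp only [PySem.Set.empty, PySem.Set.update, List.nil_append] at this
    rw [PySem.List.dedup_eq_ofList, PySem.Set.ofList_eq_foldl, this]
    rfl
  rw [h1, h2]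
  simp only [zero_add, List.nil_append]
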